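-- PySem.lean, part 2 of 3 (source lines 169-288 of 563; lines 411-563 are in no part): sorted of an already-ordered list, uniqueness of the sorted order, idempotence.
-- An excerpt: the file's own header and imports are repeated below, the enclosing namespaces are reopened, and the other parts are separate documents.
import Mathlib.Order.Defs.LinearOrder
import PySemCore

/-!
# PySem — the import surface: PySemCore (every Python-exact primitive and bridge lemma; core-Lean only, kernel-transparent)
# plus the order-theoretic SPEC lemmas of sorted / min? / max?, which need Mathlib's LinearOrder and so live here

PySemCore is core-only (so it compiles in seconds and stays kernel-transparent); the facts a port's PROOF usually needs about
sorting and extrema are stated here under Mathlib's `LinearOrder` on the key type: the output of `sorted` is ordered by key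
(and a permutation — `PySem.List.sorted_perm`), and `max?`/`min?` return an element whose key bounds every element's key.
Cite these by name; do not re-prove them.
-/

namespace PySem.List
variable {α κ : Type} [LinearOrder κ]

/-! ### Lemma pack 3 — sorted of an already-ordered list, uniqueness of the sorted order, idempotence -/

/-- a list already ordered by key is its own 'sorted' (Python's sort is stable, so ties stay put too). -/
theorem sorted_eq_self_of_pairwise (xs : _root_.List α) (key : α → κ) (h : xs.Pairwise (fun a b => key a ≤ key b)) :
    sorted xs key false = xs := by
  rw [sorted_eq_foldl_insertBy]
  suffices H : ∀ (acc rest : _root_.List α), (acc ++ rest).Pairwise (fun a b => key a ≤ key b) →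
      rest.foldl (fun acc x => insertBy (fun a b => decide (key a < key b)) x acc) acc = acc ++ rest by simpa using H [] xs (by simpa using h)
  intro acc rest
  induction rest generalizing acc with
  | nil => intro _; simp
  | cons x t ih =>
    intro hp
    simp only [_root_.List.foldl_cons]
    rw [insertBy_of_forall_not_before]
    · rw [ih (acc ++ [x]) (by simpa using hp)]; simp
    · intro y hy
      have : key y ≤ key x := (_root_.List.pairwise_append.mp hp).2.2 y hy x _root_.List.mem_cons_self
      simpa using not_lt.mpr this
theorem sorted_rev_eq_self_of_pairwise (xs : _root_.List α) (key : α → κ) (h : xs.Pairwise (fun a b => key b ≤ key a)) :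
    sorted xs key true = xs := by
  rw [sorted_rev_eq_foldl_insertBy]
  suffices H : ∀ (acc rest : _root_.List α), (acc ++ rest).Pairwise (fun a b => key b ≤ key a) →
      rest.foldl (fun acc x => insertBy (fun a b => decide (key b < key a)) x acc) acc = acc ++ rest by simpa using H [] xs (by simpa using h)
  intro acc rest
  induction rest generalizing acc with
  | nil => intro _; simp
  | cons x t ih =>
    intro hp
    simp only [_root_.List.foldl_cons]
    rw [insertBy_of_forall_not_before]
    · rw [ih (acc ++ [x]) (by simpa using hp)]; simp
    · intro y hy
      have : key x ≤ key y := (_root_.List.pairwise_append.mp hp).2.2 y hy x _root_.List.mem_cons_self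
      simpa using not_lt.mpr this
/-- sorting twice is sorting once. -/
@[simp] theorem sorted_sorted (xs : _root_.List α) (key : α → κ) : sorted (sorted xs key false) key false = sorted xs key false :=
  sorted_eq_self_of_pairwise _ key (sorted_pairwise xs key)
@[simp] theorem sorted_rev_sorted_rev (xs : _root_.List α) (key : α → κ) : sorted (sorted xs key true) key true = sorted xs key true :=
  sorted_rev_eq_self_of_pairwise _ key (sorted_pairwise_rev xs key)
/-- 'sorted' of equal-as-multiset inputs with pairwise-DISTINCT keys agree; in particular any strictly key-increasing
rearrangement of xs IS sorted(xs, key=key) (the usual way to name the sorted order explicitly). -/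
theorem eq_of_perm_of_pairwise_le_of_pairwise_lt {l₁ l₂ : _root_.List α} (key : α → κ) (hp : l₁.Perm l₂)
    (h₁ : l₁.Pairwise (fun a b => key a ≤ key b)) (h₂ : l₂.Pairwise (fun a b => key a < key b)) : l₁ = l₂ := by
  induction l₂ generalizing l₁ with
  | nil => exact hp.eq_nil
  | cons b t ih =>
    cases l₁ with
    | nil => exact absurd hp.symm.eq_nil (by simp)
    | cons a s =>
      rw [_root_.List.pairwise_cons] at h₁ h₂
      have hab : a = b := by
        by_contra hne
        have ha : a ∈ t := by simpa [hne] using hp.subset (_root_.List.mem_cons_self)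
        have hb : b ∈ s := by simpa [Ne.symm hne] using hp.symm.subset (_root_.List.mem_cons_self)
        exact absurd (lt_of_lt_of_le (h₂.1 a ha) (h₁.1 b hb)) (lt_irrefl _)
      subst hab
      rw [ih (_root_.List.Perm.cons_inv hp) h₁.2 h₂.2]
theorem sorted_eq_of_perm_of_pairwise_lt (xs ys : _root_.List α) (key : α → κ) (hp : ys.Perm xs) (hs : ys.Pairwise (fun a b => key a < key b)) :
    sorted xs key false = ys :=
  eq_of_perm_of_pairwise_le_of_pairwise_lt key ((sorted_perm xs key false).trans hp.symm) (sorted_pairwise xs key) hs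
theorem eq_of_perm_of_pairwise_ge_of_pairwise_gt {l₁ l₂ : _root_.List α} (key : α → κ) (hp : l₁.Perm l₂)
    (h₁ : l₁.Pairwise (fun a b => key b ≤ key a)) (h₂ : l₂.Pairwise (fun a b => key b < key a)) : l₁ = l₂ := by
  induction l₂ generalizing l₁ with
  | nil => exact hp.eq_nil
  | cons b t ih =>
    cases l₁ with
    | nil => exact absurd hp.symm.eq_nil (by simp)
    | cons a s =>
      rw [_root_.List.pairwise_cons] at h₁ h₂
      have hab : a = b := by
        by_contra hne
        have ha : a ∈ t := by simpa [hne] using hp.subset (_root_.List.mem_cons_self)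
        have hb : b ∈ s := by simpa [Ne.symm hne] using hp.symm.subset (_root_.List.mem_cons_self)
        exact absurd (lt_of_lt_of_le (h₂.1 a ha) (h₁.1 b hb)) (lt_irrefl _)
      subst hab
      rw [ih (_root_.List.Perm.cons_inv hp) h₁.2 h₂.2]
theorem sorted_rev_eq_of_perm_of_pairwise_gt (xs ys : _root_.List α) (key : α → κ) (hp : ys.Perm xs) (hs : ys.Pairwise (fun a b => key b < key a)) :
    sorted xs key true = ys :=
  eq_of_perm_of_pairwise_ge_of_pairwise_gt key ((sorted_perm xs key true).trans hp.symm) (sorted_pairwise_rev xs key) hs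
/-- sorted on the identity key is unique among ≤-ordered rearrangements (no tie question): the classic characterisation. -/
theorem eq_of_perm_of_pairwise_le {l₁ l₂ : _root_.List κ} (hp : l₁.Perm l₂) (h₁ : l₁.Pairwise (· ≤ ·)) (h₂ : l₂.Pairwise (· ≤ ·)) : l₁ = l₂ := by
  induction l₂ generalizing l₁ with
  | nil => exact hp.eq_nil
  | cons b t ih =>
    cases l₁ with
    | nil => exact absurd hp.symm.eq_nil (by simp)
    | cons a s =>
      rw [_root_.List.pairwise_cons] at h₁ h₂
      have hab : a = b := by
        by_contra hne
        have ha : a ∈ t := by simpa [hne] using hp.subset (_root_.List.mem_cons_self)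
        have hb : b ∈ s := by simpa [Ne.symm hne] using hp.symm.subset (_root_.List.mem_cons_self)
        exact hne (le_antisymm (h₁.1 b hb) (h₂.1 a ha))
      subst hab
      rw [ih (_root_.List.Perm.cons_inv hp) h₁.2 h₂.2]
theorem sorted_id_eq_of_perm_of_pairwise (xs ys : _root_.List κ) (hp : ys.Perm xs) (hs : ys.Pairwise (· ≤ ·)) : sorted xs (fun x => x) false = ys :=
  eq_of_perm_of_pairwise_le ((sorted_perm xs _ false).trans hp.symm) (sorted_pairwise xs (fun x => x)) hs
/-- the head of sorted(xs) has the least key; the head of sorted(xs, reverse=True) the greatest. -/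
theorem key_head_sorted_le (xs : _root_.List α) (key : α → κ) {m : α} {t : _root_.List α} (h : sorted xs key false = m :: t) : ∀ y ∈ xs, key m ≤ key y := by
  intro y hy
  have hy' : y ∈ sorted xs key false := (mem_sorted xs key false y).mpr hy
  rw [h] at hy'
  rcases _root_.List.mem_cons.mp hy' with rfl | hy'
  · exact le_refl _
  · have := sorted_pairwise xs key; rw [h, _root_.List.pairwise_cons] at this; exact this.1 y hy'
theorem key_head_sorted_rev_ge (xs : _root_.List α) (key : α → κ) {m : α} {t : _root_.List α} (h : sorted xs key true = m :: t) : ∀ y ∈ xs, key y ≤ key m := by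
  intro y hy
  have hy' : y ∈ sorted xs key true := (mem_sorted xs key true y).mpr hy
  rw [h] at hy'
  rcases _root_.List.mem_cons.mp hy' with rfl | hy'
  · exact le_refl _
  · have := sorted_pairwise_rev xs key; rw [h, _root_.List.pairwise_cons] at this; exact this.1 y hy'
/-- the sorted distinct elements: sorted(set(xs)) is STRICTLY increasing. -/
theorem sorted_ofList_pairwise_lt [BEq κ] [LawfulBEq κ] (xs : _root_.List κ) : (sorted (Set.ofList xs) (fun x => x) false).Pairwise (· < ·) := by
  have h1 := sorted_pairwise (Set.ofList xs) (fun x => x)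
  have h2 : (sorted (Set.ofList xs) (fun x => x) false).Pairwise (fun a b => a ≠ b) := (sorted_perm _ _ false).nodup_iff.mpr (Set.nodup_ofList xs)
  exact (h1.and h2).imp (fun ⟨hle, hne⟩ => lt_of_le_of_ne hle hne)

end PySem.List
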